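-- pv_equiv track=rewrite | github.com/dan4ielo/lab_and_study | projects/chess_engine/chess/pieces/movement.py | right_down
-- ===== SOURCE A (Python) =====
-- valid_files = [ord('a'), ord('b'), ord('c'),
--                ord('d'), ord('e'), ord('f'),
--                ord('g'), ord('h')]
--
-- valid_ranks = [1, 2, 3, 4, 5, 6, 7, 8]
--
-- def right_down(loc):
--     moves = []
--     file = loc[0]
--     rank = loc[1]
--     while ord(file) in valid_files and rank in valid_ranks:
--         move = (file, rank)
--         file = chr(ord(file) + 1)
--         rank -= 1
--         moves.append(move)
--     moves = [move for move in moves if 0 not in move]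
--     return moves
-- ===== SOURCE B (Python) =====
-- valid_files = [ord('a'), ord('b'), ord('c'),
--                ord('d'), ord('e'), ord('f'),
--                ord('g'), ord('h')]
--
-- valid_ranks = [1, 2, 3, 4, 5, 6, 7, 8]
--
-- def right_down(loc):
--     file_ord = ord(loc[0])
--     rank = loc[1]
--     if file_ord not in valid_files or rank not in valid_ranks:
--         return []
--     steps = min(ord('h') - file_ord, rank - 1) + 1
--     return [(chr(file_ord + i), rank - i) for i in range(steps)]
-- ===== Notes on version B (the rewrite author's own statement) =====
-- stated objective: simpler
-- what changed: B replaces A's while loop that steps a file/rank pointer pair and then runs a dead '0 not in move' filter by a single validity guard on the start square, a closed-form step count min(ord('h')-file, rank-1)+1, and one indexed comprehension.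
import Mathlib
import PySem

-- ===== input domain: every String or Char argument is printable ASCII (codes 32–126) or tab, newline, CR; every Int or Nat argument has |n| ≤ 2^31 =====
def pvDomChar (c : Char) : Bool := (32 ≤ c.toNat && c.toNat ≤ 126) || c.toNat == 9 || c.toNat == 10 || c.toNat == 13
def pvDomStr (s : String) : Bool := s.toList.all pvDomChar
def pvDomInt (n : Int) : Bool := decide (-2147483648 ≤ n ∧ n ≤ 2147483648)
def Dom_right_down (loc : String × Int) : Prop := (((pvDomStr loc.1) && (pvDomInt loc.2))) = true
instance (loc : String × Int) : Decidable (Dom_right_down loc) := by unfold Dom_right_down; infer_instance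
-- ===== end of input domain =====

-- B replaces A's while-loop pointer stepping (and its dead `0 not in move` filter) by a
-- single start-square guard plus a closed-form step count and an indexed comprehension (objective: simpler).

def valid_files : List Int := [97, 98, 99, 100, 101, 102, 103, 104]

def valid_ranks : List Int := [1, 2, 3, 4, 5, 6, 7, 8]

-- ord(s): Python raises TypeError unless s is a single character; none = that raise (excluded by Pre_).
def pyOrd? (s : String) : Option Int :=
  match s.toList with
  | [c] => some (c.toNat : Int)
  | _ => none

-- ===== PORT A =====
-- A's while loop. The guard can hold at most 8 times (ord(file) increases and must stay ≤ 104),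
-- so fuel 16 is never exhausted; fuel only makes the recursion structural.
def rdLoop : Nat → String → Int → List (String × Int) → List (String × Int)
  | 0, _, _, moves => moves
  | fuel + 1, file, rank, moves =>
    match pyOrd? file with
    | none => moves  -- Python raises TypeError here (outside Pre_)
    | some o =>
      if o ∈ valid_files ∧ rank ∈ valid_ranks then
        rdLoop fuel (String.ofList [Char.ofNat (o + 1).toNat]) (rank - 1) (moves ++ [(file, rank)])
      else moves

def right_down (loc : String × Int) : List (String × Int) :=
  let moves := rdLoop 16 loc.1 loc.2 []
  -- [move for move in moves if 0 not in move]: 0 == move[0] is always False (str), so only move[1] matters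
  moves.filter (fun move => !(move.2 == 0))

-- ===== PORT B =====
def right_down_alt (loc : String × Int) : List (String × Int) :=
  match pyOrd? loc.1 with
  | none => []  -- Python raises TypeError here (outside Pre_)
  | some f =>
    if f ∈ valid_files ∧ loc.2 ∈ valid_ranks then
      (PySem.List.pyRange 0 (min (104 - f) (loc.2 - 1) + 1) 1).map
        (fun i => (String.ofList [Char.ofNat (f + i).toNat], loc.2 - i))
    else []

-- ===== PRECONDITION & SPEC =====
-- Pre_ excludes exactly the inputs where ord(loc[0]) raises TypeError (loc[0] not a single character).
def Pre_right_down (loc : String × Int) : Prop := loc.1.toList.length = 1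
instance (loc : String × Int) : Decidable (Pre_right_down loc) := by unfold Pre_right_down; infer_instance

def pvWitness_right_down : (String × Int) := ("c", 5)

def Spec_right_down (loc : String × Int) (out : List (String × Int)) : Prop := out = right_down_alt loc
instance (loc : String × Int) (out : List (String × Int)) : Decidable (Spec_right_down loc out) := by unfold Spec_right_down; infer_instance

-- ===== CLAIM (what is proved, stated in full; the proofs are below) =====
def Claim_equal_right_down : Prop := ∀ (loc : String × Int), Dom_right_down loc → Pre_right_down loc → Spec_right_down loc (right_down loc)

-- ===== LEMMAS AND PROOFS =====


-- ===== VERDICT (by name: the statement is the Claim_ definition above) =====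
theorem right_down_spec : Claim_equal_right_down := by
  intro ⟨s, r⟩ _dom pre
  unfold Pre_right_down at pre
  obtain ⟨c, hc⟩ : ∃ c, s.toList = [c] := by
    cases h : s.toList with
    | nil => simp [h] at pre
    | cons a t => cases t with
      | nil => exact ⟨a, rfl⟩
      | cons b u => simp [h] at pre
  have hs : s = String.ofList [c] := by
    have := congrArg String.ofList hc
    rwa [String.ofList_toList] at this
  subst hs
  show _ = right_down_alt _
  by_cases hcond : ((c.toNat : Int) ∈ valid_files ∧ r ∈ valid_ranks)
  · obtain ⟨hf, hr⟩ := hcond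
    simp [valid_files] at hf
    simp [valid_ranks] at hr
    have hn : c.toNat = 97 ∨ c.toNat = 98 ∨ c.toNat = 99 ∨ c.toNat = 100 ∨ c.toNat = 101 ∨
        c.toNat = 102 ∨ c.toNat = 103 ∨ c.toNat = 104 := by omega
    have key : ∀ n : Nat, c.toNat = n → c = Char.ofNat n := fun n h => by
      rw [← h, Char.ofNat_toNat]
    rcases hn with h|h|h|h|h|h|h|h <;> obtain rfl := key _ h <;>
      rcases hr with h'|h'|h'|h'|h'|h'|h'|h' <;> subst h' <;> decide
  · have hp : pyOrd? (String.ofList [c]) = some (c.toNat : Int) := by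
      simp [pyOrd?, String.toList_ofList]
    simp [right_down, right_down_alt, rdLoop, hp, hcond]
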